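-- pv_equiv track=rewrite | github.com/ofriw/chunkhound | providers/parsing/yaml_parser.py | _sanitize_symbol
-- ===== SOURCE A (Python) =====
-- def _sanitize_symbol(symbol: str) -> str:
--     """Sanitize a symbol name for use as identifier."""
--     # Replace non-alphanumeric characters with underscores
--     sanitized = ''.join(c if c.isalnum() else '_' for c in symbol)
--
--     # Remove leading/trailing underscores and collapse multiple underscores
--     sanitized = '_'.join(part for part in sanitized.split('_') if part)
--
--     # Ensure it's not empty
--     if not sanitized:
--         sanitized = "unknown"
--
--     # Limit length
--     if len(sanitized) > 50:
--         sanitized = sanitized[:50]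
--
--     return sanitized
-- ===== SOURCE B (Python) =====
-- from itertools import groupby
--
--
-- def _sanitize_symbol(symbol: str) -> str:
--     # Join the maximal alphanumeric runs directly, in one pass.
--     sanitized = '_'.join(
--         ''.join(g) for k, g in groupby(symbol, key=str.isalnum) if k
--     )
--     if not sanitized:
--         sanitized = "unknown"
--     if len(sanitized) > 50:
--         sanitized = sanitized[:50]
--     return sanitized
-- ===== Notes on version B (the rewrite author's own statement) =====
-- stated objective: idiomatic
-- what changed: B extracts the maximal alphanumeric runs directly with itertools.groupby(symbol, key=str.isalnum) and underscore-joins them in one pass, instead of building an underscore-mapped copy of the string, splitting it on underscores and re-joining the non-empty parts.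
import Mathlib
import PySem

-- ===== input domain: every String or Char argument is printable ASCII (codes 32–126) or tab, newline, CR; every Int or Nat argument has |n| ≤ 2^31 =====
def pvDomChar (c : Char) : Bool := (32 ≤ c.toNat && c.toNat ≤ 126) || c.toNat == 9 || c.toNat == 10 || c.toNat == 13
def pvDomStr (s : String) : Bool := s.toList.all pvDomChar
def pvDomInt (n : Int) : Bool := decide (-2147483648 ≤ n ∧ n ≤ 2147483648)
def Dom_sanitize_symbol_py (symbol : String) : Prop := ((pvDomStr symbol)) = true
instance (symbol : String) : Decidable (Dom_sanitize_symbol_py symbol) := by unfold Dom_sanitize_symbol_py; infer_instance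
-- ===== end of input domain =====

-- B joins the maximal alphanumeric runs directly (itertools.groupby) instead of building an
-- underscore-mapped copy and re-splitting it; objective: simpler/idiomatic, same exact output.


-- ===== PORT A =====
-- c if c.isalnum() else '_'
def pvMapChar (c : Char) : Char := if PySem.Chars.isalnum c then c else '_'

-- hand port of s.split('_') (single-character separator), exact: Python's split with a
-- one-char sep yields the (possibly empty) pieces between occurrences of that char.
def pvSplitU : List Char → List (List Char)
  | [] => [[]]
  | c :: rest =>
      if c = '_' then [] :: pvSplitU rest
      else
        match pvSplitU rest with
        | [] => [[c]]
        | p :: ps => (c :: p) :: ps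

def sanitize_symbol_py (symbol : String) : String :=
  -- sanitized = ''.join(c if c.isalnum() else '_' for c in symbol)
  let sanitized := symbol.toList.map pvMapChar
  -- sanitized = '_'.join(part for part in sanitized.split('_') if part)
  let sanitized := PySem.Chars.join ['_'] ((pvSplitU sanitized).filter (fun p => !p.isEmpty))
  -- if not sanitized: sanitized = "unknown"
  let sanitized := if sanitized.isEmpty then "unknown".toList else sanitized
  -- if len(sanitized) > 50: sanitized = sanitized[:50]
  let sanitized := if sanitized.length > 50 then PySem.List.slice sanitized none (some 50) else sanitized
  String.mk sanitized

-- ===== PORT B =====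
-- itertools.groupby(symbol, key=str.isalnum): maximal runs of equal key, with their key
def pvGroupby (l : List Char) : List (Bool × List Char) :=
  match l with
  | [] => []
  | c :: rest =>
      (PySem.Chars.isalnum c,
        c :: rest.takeWhile (fun d => PySem.Chars.isalnum d == PySem.Chars.isalnum c)) ::
      pvGroupby (rest.dropWhile (fun d => PySem.Chars.isalnum d == PySem.Chars.isalnum c))
termination_by l.length
decreasing_by
  simp only [List.length_cons]
  exact Nat.lt_succ_of_le (rest.length_dropWhile_le _)

def sanitize_symbol_py_alt (symbol : String) : String :=
  -- sanitized = '_'.join(''.join(g) for k, g in groupby(symbol, key=str.isalnum) if k)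
  let sanitized := PySem.Chars.join ['_']
      ((pvGroupby symbol.toList).filterMap (fun g => if g.1 then some g.2 else none))
  -- if not sanitized: sanitized = "unknown"
  let sanitized := if sanitized.isEmpty then "unknown".toList else sanitized
  -- if len(sanitized) > 50: sanitized = sanitized[:50]
  let sanitized := if sanitized.length > 50 then PySem.List.slice sanitized none (some 50) else sanitized
  String.mk sanitized

-- ===== PRECONDITION & SPEC =====
def Spec_sanitize_symbol_py (symbol : String) (out : String) : Prop := out = sanitize_symbol_py_alt symbol
instance (symbol : String) (out : String) : Decidable (Spec_sanitize_symbol_py symbol out) := by unfold Spec_sanitize_symbol_py; infer_instance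

-- ===== CLAIM (what is proved, stated in full; the proofs are below) =====
def Claim_equal_sanitize_symbol_py : Prop := ∀ (symbol : String), Dom_sanitize_symbol_py symbol → Spec_sanitize_symbol_py symbol (sanitize_symbol_py symbol)

-- ===== LEMMAS AND PROOFS =====

-- canonical form: the maximal alphanumeric runs of the input
def pvRuns (l : List Char) : List (List Char) :=
  match l with
  | [] => []
  | c :: rest =>
      if PySem.Chars.isalnum c then
        (c :: rest.takeWhile PySem.Chars.isalnum) :: pvRuns (rest.dropWhile PySem.Chars.isalnum)
      else pvRuns rest
termination_by l.length
decreasing_by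
  · simp only [List.length_cons]
    exact Nat.lt_succ_of_le (rest.length_dropWhile_le _)
  · simp

theorem pvRuns_dropWhile (l : List Char) :
    pvRuns (l.dropWhile (fun d => !PySem.Chars.isalnum d)) = pvRuns l := by
  induction l with
  | nil => rfl
  | cons c r ih =>
    by_cases h : PySem.Chars.isalnum c
    · simp [List.dropWhile, h]
    · simp only [List.dropWhile, h, Bool.not_false]
      rw [ih]
      rw [pvRuns]
      simp [h]

theorem pvGroupby_runs : ∀ (n : Nat) (l : List Char), l.length ≤ n →
    (pvGroupby l).filterMap (fun g => if g.1 then some g.2 else none) = pvRuns l := by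
  intro n
  induction n with
  | zero =>
    intro l hl
    have : l = [] := List.length_eq_zero_iff.mp (Nat.le_zero.mp hl)
    subst this
    rw [pvGroupby, pvRuns]
    rfl
  | succ n ih =>
    intro l hl
    match l with
    | [] =>
      rw [pvGroupby, pvRuns]
      rfl
    | c :: rest =>
      rw [pvGroupby]
      by_cases h : PySem.Chars.isalnum c
      · simp only [h, List.filterMap_cons, if_pos trivial]
        have hk : (fun d => PySem.Chars.isalnum d == true)
            = fun d => PySem.Chars.isalnum d := by
          funext d; simp
        rw [hk, pvRuns]
        simp only [h, if_pos trivial]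
        rw [ih _ (le_trans (rest.length_dropWhile_le _) (Nat.le_of_succ_le_succ hl))]
      · simp only [Bool.not_eq_true] at h
        simp only [h, List.filterMap_cons]
        have hk : (fun d => PySem.Chars.isalnum d == false)
            = fun d => !PySem.Chars.isalnum d := by
          funext d; cases hd : PySem.Chars.isalnum d <;> simp
        rw [hk]
        simp only [Bool.false_eq_true, if_false]
        rw [ih _ (le_trans (rest.length_dropWhile_le _) (Nat.le_of_succ_le_succ hl))]
        rw [pvRuns_dropWhile, pvRuns]
        simp [h]

theorem pvMapChar_of_alnum (d : Char) (h : PySem.Chars.isalnum d = true) : pvMapChar d = d := by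
  simp [pvMapChar, h]

theorem pvMapChar_of_not_alnum (d : Char) (h : PySem.Chars.isalnum d = false) :
    pvMapChar d = '_' := by
  simp [pvMapChar, h]

theorem pvAlnum_ne_underscore (d : Char) (h : PySem.Chars.isalnum d = true) : d ≠ '_' := by
  intro he
  rw [he] at h
  exact absurd h (by decide)

theorem pvMapChar_ne (d : Char) : (decide (pvMapChar d ≠ '_')) = PySem.Chars.isalnum d := by
  cases hd : PySem.Chars.isalnum d
  · simp [pvMapChar_of_not_alnum d hd]
  · simp [pvMapChar_of_alnum d hd, pvAlnum_ne_underscore d hd]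

theorem pvMap_takeWhile (l : List Char) :
    (l.takeWhile PySem.Chars.isalnum).map pvMapChar = l.takeWhile PySem.Chars.isalnum := by
  induction l with
  | nil => rfl
  | cons c r ih =>
    cases h : PySem.Chars.isalnum c
    · simp [List.takeWhile, h]
    · simp [List.takeWhile, h, pvMapChar_of_alnum c h, ih]

theorem pvSplitU_eq (m : List Char) :
    pvSplitU m = m.takeWhile (fun c => c ≠ '_') ::
      (match m.dropWhile (fun c => c ≠ '_') with
       | [] => []
       | _ :: t => pvSplitU t) := by
  induction m with
  | nil => rfl
  | cons c r ih =>
    by_cases h : c = '_'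
    · subst h
      simp [pvSplitU, List.takeWhile, List.dropWhile]
    · rw [pvSplitU]
      simp only [if_neg h]
      rw [ih]
      simp [List.takeWhile, List.dropWhile, h]

theorem pvComp_eq_alnum : ((fun d => decide (d ≠ '_')) ∘ pvMapChar) = PySem.Chars.isalnum := by
  funext d
  simp only [Function.comp]
  exact pvMapChar_ne d

theorem pvSplitU_runs : ∀ (n : Nat) (l : List Char), l.length ≤ n →
    ((pvSplitU (l.map pvMapChar)).filter (fun p => !p.isEmpty)) = pvRuns l := by
  intro n
  induction n with
  | zero =>
    intro l hl
    have : l = [] := List.length_eq_zero_iff.mp (Nat.le_zero.mp hl)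
    subst this
    rw [pvRuns]
    rfl
  | succ n ih =>
    intro l hl
    match l with
    | [] =>
      rw [pvRuns]
      rfl
    | c :: rest =>
      cases h : PySem.Chars.isalnum c
      · rw [List.map_cons, pvMapChar_of_not_alnum c h, pvSplitU]
        rw [if_pos (show ('_' : Char) = '_' from rfl)]
        rw [show List.filter (fun p => !p.isEmpty) ([] :: pvSplitU (rest.map pvMapChar))
              = List.filter (fun p => !p.isEmpty) (pvSplitU (rest.map pvMapChar)) from by simp]
        rw [ih _ (Nat.le_of_succ_le_succ hl)]
        rw [show pvRuns (c :: rest) = pvRuns rest from by rw [pvRuns]; simp [h]]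
      · have hcu : c ≠ '_' := pvAlnum_ne_underscore c h
        rw [List.map_cons, pvMapChar_of_alnum c h, pvSplitU_eq]
        rw [List.takeWhile_cons_of_pos (by simpa using hcu)]
        rw [show List.dropWhile (fun x => decide ¬x = '_') (c :: List.map pvMapChar rest)
              = List.dropWhile (fun x => decide ¬x = '_') (List.map pvMapChar rest) from
            List.dropWhile_cons_of_pos (by simpa using hcu)]
        have htw : (rest.map pvMapChar).takeWhile (fun d => decide (d ≠ '_'))
            = rest.takeWhile PySem.Chars.isalnum := by
          rw [List.takeWhile_map, pvComp_eq_alnum]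
          exact pvMap_takeWhile rest
        have hdw : (rest.map pvMapChar).dropWhile (fun d => decide (d ≠ '_'))
            = (rest.dropWhile PySem.Chars.isalnum).map pvMapChar := by
          rw [List.dropWhile_map, pvComp_eq_alnum]
        rw [htw, hdw]
        rw [show pvRuns (c :: rest)
              = (c :: rest.takeWhile PySem.Chars.isalnum)
                  :: pvRuns (rest.dropWhile PySem.Chars.isalnum) from by
            rw [pvRuns]; simp [h]]
        rcases hr2 : rest.dropWhile PySem.Chars.isalnum with _ | ⟨d, t⟩
        · rw [pvRuns]
          simp
        · have hd : PySem.Chars.isalnum d = false := by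
            have h0 : 0 < (rest.dropWhile PySem.Chars.isalnum).length := by
              rw [hr2]; simp
            have := List.dropWhile_get_zero_not (p := PySem.Chars.isalnum) rest h0
            revert this
            simp [hr2]
          rw [List.map_cons, pvMapChar_of_not_alnum d hd]
          have hlen : t.length ≤ n := by
            have h1 : (d :: t).length ≤ rest.length := hr2 ▸ rest.length_dropWhile_le _
            have h2 : rest.length ≤ n := by
              have := hl
              simp only [List.length_cons] at this
              omega
            simp only [List.length_cons] at h1
            omega
          simp only [List.filter_cons, List.isEmpty_cons, Bool.not_false, if_pos trivial]
          rw [ih _ hlen]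
          rw [show pvRuns (d :: t) = pvRuns t from by rw [pvRuns]; simp [hd]]

-- ===== VERDICT (by name: the statement is the Claim_ definition above) =====
theorem sanitize_symbol_py_spec : Claim_equal_sanitize_symbol_py := by
  intro symbol _
  unfold Spec_sanitize_symbol_py
  simp only [sanitize_symbol_py, sanitize_symbol_py_alt,
    pvSplitU_runs symbol.toList.length symbol.toList le_rfl,
    pvGroupby_runs symbol.toList.length symbol.toList le_rfl]
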